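-- pv_equiv track=rewrite | github.com/Al-HassanK/Python-for-Genomics-Data-Science | MultiFastaAnalyzer.py | Find_The_Longest_ORF
-- ===== SOURCE A (Python) =====
-- def Find_The_Longest_ORF(orf_list):
--     max_len = sorted([len(orf) for orf in orf_list])[-1] # the maximum length between all the orfs...
--
--     # Get the orfs equal to the maximum length
--     longest_orfs = []
--     for orf in orf_list:
--         if len(orf) == max_len:
--             longest_orfs.append((orf, len(orf)))
--             max_len = len(orf)
--
--     return longest_orfs
-- ===== SOURCE B (Python) =====
-- def Find_The_Longest_ORF(orf_list):
--     best = -1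
--     longest = []
--     for orf in orf_list:
--         n = len(orf)
--         if n > best:
--             best = n
--             longest = [(orf, n)]
--         elif n == best:
--             longest.append((orf, n))
--     return longest
-- ===== Notes on version B (the rewrite author's own statement) =====
-- stated objective: simpler
-- what changed: Replaced the sort-to-find-the-maximum plus second filtering pass by a single pass that tracks the best length seen and resets/extends the result list as it goes.
-- outside the precondition, e.g. on Find_The_Longest_ORF([]): A raises IndexError, B returns []
import Mathlib
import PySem

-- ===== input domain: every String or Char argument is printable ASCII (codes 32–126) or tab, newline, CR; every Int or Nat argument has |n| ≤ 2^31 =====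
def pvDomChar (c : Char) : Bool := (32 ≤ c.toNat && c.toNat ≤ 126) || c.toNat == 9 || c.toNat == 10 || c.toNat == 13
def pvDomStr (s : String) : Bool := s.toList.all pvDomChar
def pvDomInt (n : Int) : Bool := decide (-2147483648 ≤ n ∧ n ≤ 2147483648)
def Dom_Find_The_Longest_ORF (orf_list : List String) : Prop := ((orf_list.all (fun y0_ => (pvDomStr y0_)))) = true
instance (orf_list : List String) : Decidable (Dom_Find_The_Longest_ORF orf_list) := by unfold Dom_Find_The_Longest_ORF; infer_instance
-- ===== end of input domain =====

-- B replaces A's sort-then-filter by a single pass tracking the best length; on the empty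
-- list A raises IndexError (excluded by Pre_) while B returns [].

-- ===== PORT A =====
def Find_The_Longest_ORF (orf_list : List String) : List (String × Int) :=
  match PySem.List.pyGet?
      (PySem.List.sorted (orf_list.map (fun orf => PySem.Str.len orf)) (fun x => x) false)
      (-1) with
  | none => []   -- IndexError on the empty list; excluded by Pre_
  | some max_len =>
    (orf_list.foldl
      (fun (st : Int × List (String × Int)) orf =>
        if PySem.Str.len orf = st.1 then
          (PySem.Str.len orf, st.2 ++ [(orf, PySem.Str.len orf)])
        else st)
      (max_len, [])).2

-- ===== PORT B =====
def Find_The_Longest_ORF_alt (orf_list : List String) : List (String × Int) :=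
  (orf_list.foldl
    (fun (st : Int × List (String × Int)) orf =>
      let n := PySem.Str.len orf
      if st.1 < n then (n, [(orf, n)])
      else if n = st.1 then (st.1, st.2 ++ [(orf, n)])
      else st)
    (-1, [])).2

-- ===== PRECONDITION & SPEC =====
-- Pre_ excludes exactly the empty list, on which A raises IndexError
-- (indexing [-1] into the empty sorted length list); B naturally returns [] there.
def Pre_Find_The_Longest_ORF (orf_list : List String) : Prop := orf_list ≠ []
instance (orf_list : List String) : Decidable (Pre_Find_The_Longest_ORF orf_list) := by unfold Pre_Find_The_Longest_ORF; infer_instance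
def pvWitness_Find_The_Longest_ORF : List String := ["ATG", "ATGAAA"]

def Spec_Find_The_Longest_ORF (orf_list : List String) (out : List (String × Int)) : Prop := out = Find_The_Longest_ORF_alt orf_list
instance (orf_list : List String) (out : List (String × Int)) : Decidable (Spec_Find_The_Longest_ORF orf_list out) := by unfold Spec_Find_The_Longest_ORF; infer_instance

-- ===== CLAIM (what is proved, stated in full; the proofs are below) =====
def Claim_equal_Find_The_Longest_ORF : Prop := ∀ (orf_list : List String), Dom_Find_The_Longest_ORF orf_list → Pre_Find_The_Longest_ORF orf_list → Spec_Find_The_Longest_ORF orf_list (Find_The_Longest_ORF orf_list)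

-- ===== LEMMAS AND PROOFS =====

-- the list of max-length orfs paired with their lengths, for a given maximum m
def pvCollect (m : Int) (xs : List String) : List (String × Int) :=
  (xs.filter (fun o => decide (PySem.Str.len o = m))).map (fun o => (o, PySem.Str.len o))

-- running maximum of the lengths, seeded with a
def pvMaxAux (a : Int) (xs : List String) : Int :=
  xs.foldl (fun m o => max m (PySem.Str.len o)) a

theorem init_le_pvMaxAux (a : Int) (xs : List String) : a ≤ pvMaxAux a xs := by
  induction xs generalizing a with
  | nil => simp [pvMaxAux]
  | cons x t ih =>
    exact le_trans (le_max_left _ (PySem.Str.len x))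
      (ih (max a (PySem.Str.len x)))

theorem le_pvMaxAux (a : Int) (xs : List String) (o : String) (ho : o ∈ xs) :
    PySem.Str.len o ≤ pvMaxAux a xs := by
  induction xs generalizing a with
  | nil => cases ho
  | cons x t ih =>
    rcases List.mem_cons.mp ho with h | h
    · subst h
      exact le_trans (le_max_right a _) (init_le_pvMaxAux _ t)
    · exact ih (max a (PySem.Str.len x)) h

theorem pvMaxAux_eq_or_mem (a : Int) (xs : List String) :
    pvMaxAux a xs = a ∨ ∃ o ∈ xs, pvMaxAux a xs = PySem.Str.len o := by
  induction xs generalizing a with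
  | nil => left; rfl
  | cons x t ih =>
    have hstep : pvMaxAux a (x :: t) = pvMaxAux (max a (PySem.Str.len x)) t := rfl
    rcases ih (max a (PySem.Str.len x)) with h | ⟨o, ho, h⟩
    · rcases max_cases a (PySem.Str.len x) with ⟨he, _⟩ | ⟨he, _⟩
      · left; rw [hstep, h, he]
      · right; exact ⟨x, List.mem_cons_self, by rw [hstep, h, he]⟩
    · right; exact ⟨o, List.mem_cons_of_mem _ ho, by rw [hstep, h]⟩

-- A's collecting loop keeps its max unchanged and appends pvCollect
theorem A_loop (xs : List String) (m : Int) (acc : List (String × Int)) :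
    xs.foldl
      (fun (st : Int × List (String × Int)) orf =>
        if PySem.Str.len orf = st.1 then
          (PySem.Str.len orf, st.2 ++ [(orf, PySem.Str.len orf)])
        else st)
      (m, acc)
    = (m, acc ++ pvCollect m xs) := by
  induction xs generalizing acc with
  | nil => simp [pvCollect]
  | cons x t ih =>
    simp only [List.foldl_cons]
    by_cases h : PySem.Str.len x = m
    · rw [if_pos h, h, ih]
      have h' : ((x.length : Int)) = m := by simpa using h
      simp [pvCollect, h']
    · rw [if_neg h, ih]
      have h' : ¬ ((x.length : Int)) = m := by simpa using h
      simp [pvCollect, h']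

-- B's loop computes the running maximum together with its collection
theorem B_loop (xs : List String) :
    xs.foldl
      (fun (st : Int × List (String × Int)) orf =>
        let n := PySem.Str.len orf
        if st.1 < n then (n, [(orf, n)])
        else if n = st.1 then (st.1, st.2 ++ [(orf, n)])
        else st)
      (-1, [])
    = (pvMaxAux (-1) xs, pvCollect (pvMaxAux (-1) xs) xs) := by
  induction xs using List.reverseRecOn with
  | nil => simp [pvMaxAux, pvCollect]
  | append_singleton t x ih =>
    rw [List.foldl_append, ih]
    simp only [List.foldl_cons, List.foldl_nil, PySem.Str.len_eq, String.length_toList]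
    have hmax : pvMaxAux (-1) (t ++ [x]) = max (pvMaxAux (-1) t) ((x.length : Int)) := by
      simp [pvMaxAux]
    have hlen : ∀ o ∈ t, ((o.length : Int)) ≤ pvMaxAux (-1) t := fun o ho => by
      simpa using le_pvMaxAux (-1) t o ho
    have hcoll : ∀ m : Int, pvCollect m (t ++ [x])
        = pvCollect m t ++ (if ((x.length : Int)) = m then [(x, ((x.length : Int)))] else []) := by
      intro m
      by_cases hx : ((x.length : Int)) = m <;> simp [pvCollect, hx]
    by_cases hlt : pvMaxAux (-1) t < ((x.length : Int))
    · rw [if_pos hlt]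
      have hfilter : pvCollect ((x.length : Int)) t = [] := by
        simp only [pvCollect, List.map_eq_nil_iff, List.filter_eq_nil_iff, PySem.Str.len_eq,
          String.length_toList, decide_eq_true_eq]
        intro o ho
        have := hlen o ho
        omega
      rw [hmax, max_eq_right (le_of_lt hlt), hcoll, hfilter]
      simp
    · rw [if_neg hlt]
      have hm : pvMaxAux (-1) (t ++ [x]) = pvMaxAux (-1) t := by
        rw [hmax]; exact max_eq_left (le_of_not_gt hlt)
      rw [hm, hcoll]
      by_cases heq : ((x.length : Int)) = pvMaxAux (-1) t
      · rw [if_pos heq, if_pos heq]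
      · rw [if_neg heq, if_neg heq]
        simp

-- the last element of the sorted length list is the running maximum of the lengths
theorem sorted_last_eq_pvMax (xs : List String) (h : xs ≠ []) :
    PySem.List.pyGet?
      (PySem.List.sorted (xs.map (fun orf => PySem.Str.len orf)) (fun x => x) false)
      (-1)
    = some (pvMaxAux (-1) xs) := by
  have hsne : PySem.List.sorted (xs.map (fun orf => PySem.Str.len orf)) (fun x => x) false ≠ [] := by
    intro hcon
    exact h (by simpa using (PySem.List.sorted_eq_nil_iff _ _ _).mp hcon)
  rw [PySem.List.pyGet?_neg_one, List.getLast?_eq_getLast_of_ne_nil hsne]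
  congr 1
  have hpos := List.length_pos_of_ne_nil hsne
  -- every element of the sorted list is ≤ its last element
  have hall : ∀ y ∈ PySem.List.sorted (xs.map (fun orf => PySem.Str.len orf)) (fun x => x) false,
      y ≤ (PySem.List.sorted (xs.map (fun orf => PySem.Str.len orf)) (fun x => x) false).getLast hsne := by
    intro y hy
    obtain ⟨p, hp, hyp⟩ := List.getElem_of_mem hy
    have hmono := PySem.List.sorted_id_getElem_mono
      (xs := xs.map (fun orf => PySem.Str.len orf))
      (p := p)
      (q := (PySem.List.sorted (xs.map (fun orf => PySem.Str.len orf)) (fun x => x) false).length - 1)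
      (by omega) (by omega)
    rw [List.getLast_eq_getElem, ← hyp]
    exact hmono
  -- the last element is a length of some element of xs
  have hLlens := (PySem.List.mem_sorted _ _ _ _).mp
    (List.getLast_mem hsne (l := PySem.List.sorted (xs.map (fun orf => PySem.Str.len orf)) (fun x => x) false))
  obtain ⟨o, ho, hoL⟩ := List.mem_map.mp hLlens
  -- the running maximum is a length of some element of xs
  rcases pvMaxAux_eq_or_mem (-1) xs with hmx | ⟨o2, ho2, hmx⟩
  · obtain ⟨z, hz⟩ := List.exists_mem_of_ne_nil xs h
    have h1 := le_pvMaxAux (-1) xs z hz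
    have h2 : (0:Int) ≤ PySem.Str.len z := by simp [PySem.Str.len_eq]
    omega
  · have hmem : pvMaxAux (-1) xs ∈
        PySem.List.sorted (xs.map (fun orf => PySem.Str.len orf)) (fun x => x) false :=
      (PySem.List.mem_sorted _ _ _ _).mpr (by rw [hmx]; exact List.mem_map_of_mem ho2)
    have h1 := hall _ hmem
    have h2 : (PySem.List.sorted (xs.map (fun orf => PySem.Str.len orf)) (fun x => x) false).getLast hsne
        ≤ pvMaxAux (-1) xs := by
      rw [← hoL]; exact le_pvMaxAux (-1) xs o ho
    omega

-- ===== VERDICT (by name: the statement is the Claim_ definition above) =====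
theorem Find_The_Longest_ORF_spec : Claim_equal_Find_The_Longest_ORF := by
  intro xs _ hpre
  unfold Spec_Find_The_Longest_ORF Find_The_Longest_ORF Find_The_Longest_ORF_alt
  rw [sorted_last_eq_pvMax xs hpre]
  simp only
  rw [A_loop, B_loop]
  simp
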